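-- pv_equiv track=rewrite | github.com/SwJay/tft | src/solver.py | get_beta
-- ===== SOURCE A (Python) =====
-- def get_beta(a, b):
--     n = len(a)
--     beta = 0
--     bi = 0
--     bj = 0
--     for i in range(n-1):
--         for j in range(i+1,n):
--             tmp = b[j]*a[i]-b[i]*a[j]
--             if beta < tmp:
--                 beta = tmp
--                 bi = i
--                 bj = j
--     return beta
-- ===== SOURCE B (Python) =====
-- def get_beta(a, b):
--     def cross(o, p, q):
--         return (p[0] - o[0]) * (q[1] - o[1]) - (p[1] - o[1]) * (q[0] - o[0])
--
--     def chain(pts, s):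
--         # half hull (Andrew monotone chain) of a lex-sorted point list;
--         # s = +1 keeps the upper chain, s = -1 the lower chain
--         st = []
--         for p in pts:
--             while len(st) >= 2 and s * cross(st[-2], st[-1], p) >= 0:
--                 st.pop()
--             st.append(p)
--         return st
--
--     def insert(pts, q):
--         # keep pts lex-sorted
--         for k in range(len(pts)):
--             if q < pts[k]:
--                 return pts[:k] + [q] + pts[k:]
--         return pts + [q]
--
--     best = 0
--     pts = []  # lex-sorted points of the prefix seen so far
--     for x, y in zip(a, b):
--         # maximize dot((px,py),(y,-x)) = px*y - py*x over the prefix: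
--         # the maximum is attained on one of the two convex chains
--         for hull in (chain(pts, 1), chain(pts, -1)):
--             for px, py in hull:
--                 cur = px * y - py * x
--                 if cur > best:
--                     best = cur
--         pts = insert(pts, (x, y))
--     return best
-- ===== Notes on version B (the rewrite author's own statement) =====
-- stated objective: alternative
-- what changed: B replaces A's all-pairs double index loop by a computational-geometry sweep: it keeps the prefix points lex-sorted, builds their upper and lower convex chains (Andrew monotone chain) at each step, and for each new point (x,y) maximizes the support function p1*y-p2*x over the chain vertices only, which is exact because the maximum of a linear functional over a point set is attained on its convex hull.
import Mathlib
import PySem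

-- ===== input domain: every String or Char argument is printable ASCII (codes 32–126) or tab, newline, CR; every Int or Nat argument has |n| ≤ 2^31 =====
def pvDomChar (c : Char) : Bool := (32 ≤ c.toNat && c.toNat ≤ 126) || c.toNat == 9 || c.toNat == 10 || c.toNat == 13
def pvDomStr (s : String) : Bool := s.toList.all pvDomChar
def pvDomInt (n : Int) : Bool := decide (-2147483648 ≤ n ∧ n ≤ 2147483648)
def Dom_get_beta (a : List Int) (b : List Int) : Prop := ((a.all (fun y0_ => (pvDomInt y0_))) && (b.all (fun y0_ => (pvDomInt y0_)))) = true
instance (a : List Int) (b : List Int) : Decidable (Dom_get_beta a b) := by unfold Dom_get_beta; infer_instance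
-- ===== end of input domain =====

-- B replaces A's all-pairs double loop by a sweep that keeps the prefix points in a
-- lex-sorted list and, for each new point (x,y), queries only the two convex chains
-- (Andrew monotone chain) of that prefix for the maximum of p.1*y - p.2*x;
-- objective: alternative (convex-hull algorithm, same worst-case cost).

-- ===== PORT A =====
def get_beta (a : List Int) (b : List Int) : Int :=
  let n : Int := a.length
  let s := (PySem.List.pyRange 0 (n - 1) 1).foldl (fun (st : Int × Int × Int) i =>
      (PySem.List.pyRange (i + 1) n 1).foldl (fun (st : Int × Int × Int) j =>
        let tmp := PySem.List.pyGetD b j 0 * PySem.List.pyGetD a i 0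
                   - PySem.List.pyGetD b i 0 * PySem.List.pyGetD a j 0
        if st.1 < tmp then (tmp, i, j) else st) st)
    (0, 0, 0)
  s.1

-- ===== PORT B =====
def pvCrossB (o p q : Int × Int) : Int :=
  (p.1 - o.1) * (q.2 - o.2) - (p.2 - o.2) * (q.1 - o.1)

/-- the pop-while loop of the monotone chain; stack head = top of stack -/
def pvPop (s : Int) (st : List (Int × Int)) (c : Int × Int) : List (Int × Int) :=
  match st with
  | m :: u :: rest => if 0 ≤ s * pvCrossB u m c then pvPop s (u :: rest) c else m :: u :: rest
  | _ => st
termination_by st.length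
decreasing_by simp

/-- half hull of a lex-sorted list (s = 1: upper chain, s = -1: lower chain) -/
def pvChain (s : Int) (pts : List (Int × Int)) : List (Int × Int) :=
  (pts.foldl (fun st p => p :: pvPop s st p) []).reverse

/-- insertion into a lex-sorted list (python tuple `<`) -/
def pvInsert (pts : List (Int × Int)) (q : Int × Int) : List (Int × Int) :=
  match pts with
  | [] => [q]
  | p :: rest =>
      if q.1 < p.1 ∨ (q.1 = p.1 ∧ q.2 < p.2) then q :: p :: rest
      else p :: pvInsert rest q

def get_beta_alt (a : List Int) (b : List Int) : Int :=
  ((a.zip b).foldl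
    (fun (st : Int × List (Int × Int)) (xy : Int × Int) =>
      let best := [pvChain 1 st.2, pvChain (-1) st.2].foldl
        (fun bst hull => hull.foldl
          (fun bst pq =>
            let cur := pq.1 * xy.2 - pq.2 * xy.1
            if cur > bst then cur else bst) bst) st.1
      (best, pvInsert st.2 xy))
    (0, ([] : List (Int × Int)))).1

-- ===== PRECONDITION & SPEC =====
-- A raises IndexError (reading b[j] for j up to len(a)-1) exactly when len(a) ≥ 2 and len(b) < len(a).
def Pre_get_beta (a : List Int) (b : List Int) : Prop :=
  a.length ≤ 1 ∨ a.length ≤ b.length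
instance (a : List Int) (b : List Int) : Decidable (Pre_get_beta a b) := by
  unfold Pre_get_beta; infer_instance

def pvWitness_get_beta : List Int × List Int := ([1, 2], [3, 4])

def Spec_get_beta (a : List Int) (b : List Int) (out : Int) : Prop := out = get_beta_alt a b
instance (a : List Int) (b : List Int) (out : Int) : Decidable (Spec_get_beta a b out) := by unfold Spec_get_beta; infer_instance

-- ===== CLAIM (what is proved, stated in full; the proofs are below) =====
def Claim_equal_get_beta : Prop := ∀ (a : List Int) (b : List Int), Dom_get_beta a b → Pre_get_beta a b → Spec_get_beta a b (get_beta a b)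

-- ===== LEMMAS AND PROOFS =====

/-- folded maximum, the common shape of all the loops -/
def fmax (c : Int) (l : List Int) : Int := l.foldl max c

/-- dot product of a point with a direction -/
def dotp (p d : Int × Int) : Int := p.1 * d.1 + p.2 * d.2

/-- non-strict lexicographic order on points (python tuple `<=`) -/
def lexLe (p q : Int × Int) : Prop := p.1 < q.1 ∨ (p.1 = q.1 ∧ p.2 ≤ q.2)

/-- the simple append-order sweep, a proof-side stepping stone between the ports -/
def pvSweep (a : List Int) (b : List Int) : Int :=
  ((a.zip b).foldl (fun (st : Int × List (Int × Int)) (xy : Int × Int) =>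
      let best := st.2.foldl (fun bst pq =>
        let cur := pq.1 * xy.2 - pq.2 * xy.1
        if cur > bst then cur else bst) st.1
      (best, st.2 ++ [xy])) (0, ([] : List (Int × Int)))).1

/-- cross product of the i-th and j-th points of a zipped list -/
def cP (L : List (Int × Int)) (i j : Nat) : Int :=
  (L.getD i (0, 0)).1 * (L.getD j (0, 0)).2 - (L.getD i (0, 0)).2 * (L.getD j (0, 0)).1

/-- the values the sweep compares, row by row -/
def valsB (seen : List (Int × Int)) : List (Int × Int) → List Int
  | [] => []
  | xy :: rest => seen.map (fun pq => pq.1 * xy.2 - pq.2 * xy.1) ++ valsB (seen ++ [xy]) rest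

/-- the values A's double loop compares -/
def valsA (a b : List Int) : List Int :=
  (PySem.List.pyRange 0 ((a.length : Int) - 1) 1).flatMap (fun i =>
    (PySem.List.pyRange (i + 1) (a.length : Int) 1).map (fun j =>
      PySem.List.pyGetD b j 0 * PySem.List.pyGetD a i 0
      - PySem.List.pyGetD b i 0 * PySem.List.pyGetD a j 0))

lemma fmax_append (c : Int) (l1 l2 : List Int) : fmax c (l1 ++ l2) = fmax (fmax c l1) l2 := by
  simp [fmax, List.foldl_append]

lemma fmax_le_iff (l : List Int) (c x : Int) : fmax c l ≤ x ↔ c ≤ x ∧ ∀ y ∈ l, y ≤ x := by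
  induction l generalizing c with
  | nil => simp [fmax]
  | cons hd t ih =>
    show fmax (max c hd) t ≤ x ↔ _
    rw [ih, max_le_iff]
    simp only [List.forall_mem_cons]
    tauto

lemma fmax_eq_of_mem_iff (c : Int) (l1 l2 : List Int) (h : ∀ x, x ∈ l1 ↔ x ∈ l2) :
    fmax c l1 = fmax c l2 := by
  have h1 := (fmax_le_iff l1 c (fmax c l1)).mp le_rfl
  have h2 := (fmax_le_iff l2 c (fmax c l2)).mp le_rfl
  refine le_antisymm ?_ ?_
  · exact (fmax_le_iff l1 c _).mpr ⟨h2.1, fun y hy => h2.2 y ((h y).mp hy)⟩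
  · exact (fmax_le_iff l2 c _).mpr ⟨h1.1, fun y hy => h1.2 y ((h y).mpr hy)⟩

lemma le_fmax_of_mem {l : List Int} {x : Int} (c : Int) (hx : x ∈ l) : x ≤ fmax c l :=
  ((fmax_le_iff l c (fmax c l)).mp le_rfl).2 x hx

lemma c_le_fmax (c : Int) (l : List Int) : c ≤ fmax c l :=
  ((fmax_le_iff l c (fmax c l)).mp le_rfl).1

lemma foldA_inner (f : Int → Int) (i : Int) (js : List Int) :
    ∀ (st : Int × Int × Int),
      (js.foldl (fun st j => if st.1 < f j then (f j, i, j) else st) st).1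
        = fmax st.1 (js.map f) := by
  induction js with
  | nil => intro st; simp [fmax]
  | cons j t ih =>
    intro st
    simp only [List.foldl_cons, List.map_cons]
    rw [ih]
    show _ = fmax (max st.1 (f j)) (t.map f)
    congr 1
    rw [max_def]; split_ifs <;> simp_all <;> omega

lemma foldA_outer (n : Int) (F : Int → Int → Int) (is : List Int) :
    ∀ (st : Int × Int × Int),
      (is.foldl (fun st i => (PySem.List.pyRange (i + 1) n 1).foldl
          (fun st j => if st.1 < F i j then (F i j, i, j) else st) st) st).1
        = fmax st.1 (is.flatMap fun i => (PySem.List.pyRange (i + 1) n 1).map (F i)) := by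
  induction is with
  | nil => intro st; simp [fmax]
  | cons i t ih =>
    intro st
    simp only [List.foldl_cons, List.flatMap_cons]
    rw [ih, fmax_append, foldA_inner]

lemma get_beta_eq (a b : List Int) : get_beta a b = fmax 0 (valsA a b) := by
  show (_ : Int × Int × Int).1 = _
  rw [valsA]
  exact foldA_outer (a.length : Int)
    (fun i j => PySem.List.pyGetD b j 0 * PySem.List.pyGetD a i 0
      - PySem.List.pyGetD b i 0 * PySem.List.pyGetD a j 0) _ (0, 0, 0)

lemma foldB_inner (x y : Int) (l : List (Int × Int)) :
    ∀ (c : Int),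
      l.foldl (fun bst pq =>
        let cur := pq.1 * y - pq.2 * x
        if cur > bst then cur else bst) c
        = fmax c (l.map fun pq => pq.1 * y - pq.2 * x) := by
  induction l with
  | nil => intro c; simp [fmax]
  | cons pq t ih =>
    intro c
    simp only [List.foldl_cons, List.map_cons]
    rw [ih]
    show _ = fmax (max c (pq.1 * y - pq.2 * x)) _
    congr 1
    rw [max_def]; split_ifs <;> omega

lemma foldB (rest : List (Int × Int)) :
    ∀ (st : Int × List (Int × Int)),
      (rest.foldl (fun (st : Int × List (Int × Int)) (xy : Int × Int) =>
          let best := st.2.foldl (fun bst pq =>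
            let cur := pq.1 * xy.2 - pq.2 * xy.1
            if cur > bst then cur else bst) st.1
          (best, st.2 ++ [xy])) st).1
        = fmax st.1 (valsB st.2 rest) := by
  induction rest with
  | nil => intro st; simp [fmax, valsB]
  | cons xy t ih =>
    intro st
    simp only [List.foldl_cons]
    rw [ih]
    show fmax (st.2.foldl _ st.1) (valsB (st.2 ++ [xy]) t) = _
    rw [valsB, fmax_append, foldB_inner]

lemma sweep_eq (a b : List Int) : pvSweep a b = fmax 0 (valsB [] (a.zip b)) := by
  show (_ : Int × List (Int × Int)).1 = _
  exact foldB (a.zip b) (0, [])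

lemma getD_mid (pre : List (Int × Int)) (y : Int × Int) (rest : List (Int × Int)) :
    (pre ++ y :: rest).getD pre.length (0, 0) = y := by
  induction pre with
  | nil => simp
  | cons p t ih => simpa using ih

lemma mem_valsB (rest : List (Int × Int)) :
    ∀ (seen : List (Int × Int)) (x : Int),
      x ∈ valsB seen rest ↔
        ∃ i j : Nat, i < j ∧ seen.length ≤ j ∧ j < (seen ++ rest).length ∧
          x = cP (seen ++ rest) i j := by
  induction rest with
  | nil =>
    intro seen x
    simp only [valsB, List.mem_nil_iff, List.append_nil, false_iff]
    rintro ⟨i, j, h1, h2, h3, -⟩; omega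
  | cons xy t ih =>
    intro seen x
    have hM : (seen ++ xy :: t) = (seen ++ [xy]) ++ t := by simp
    simp only [valsB, List.mem_append, List.mem_map, ih (seen ++ [xy])]
    constructor
    · rintro (⟨pq, hpq, hx⟩ | ⟨i, j, h1, h2, h3, hx⟩)
      · obtain ⟨i, hi, rfl⟩ := List.getElem_of_mem hpq
        refine ⟨i, seen.length, hi, le_rfl, by simp <;> omega, ?_⟩
        rw [cP, getD_mid]
        have : (seen ++ xy :: t).getD i (0, 0) = seen[i] := by
          rw [List.getD_eq_getElem?_getD, List.getElem?_append_left hi]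
          simp [List.getElem?_eq_getElem hi]
        rw [this, ← hx]
      · refine ⟨i, j, h1, by simp at h2 ⊢; omega, by rw [hM]; exact h3, ?_⟩
        rwa [hM]
    · rintro ⟨i, j, h1, h2, h3, hx⟩
      rcases Nat.eq_or_lt_of_le h2 with hj | hj
      · left
        have hi : i < seen.length := by omega
        refine ⟨seen[i], List.getElem_mem hi, ?_⟩
        have e1 : (seen ++ xy :: t).getD i (0, 0) = seen[i] := by
          rw [List.getD_eq_getElem?_getD, List.getElem?_append_left hi]
          simp [List.getElem?_eq_getElem hi]
        have e2 : (seen ++ xy :: t).getD j (0, 0) = xy := by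
          rw [← hj]; exact getD_mid seen xy t
        rw [hx, cP, e1, e2]
      · right
        exact ⟨i, j, h1, by simp <;> omega, by rw [← hM]; exact h3, by rwa [← hM]⟩

lemma mem_valsA (a b : List Int) (x : Int) :
    x ∈ valsA a b ↔
      ∃ i j : Int, 0 ≤ i ∧ i < (a.length : Int) - 1 ∧ i + 1 ≤ j ∧ j < (a.length : Int) ∧
        x = PySem.List.pyGetD b j 0 * PySem.List.pyGetD a i 0
            - PySem.List.pyGetD b i 0 * PySem.List.pyGetD a j 0 := by
  simp only [valsA, List.mem_flatMap, List.mem_map, PySem.List.mem_pyRange_one]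
  constructor
  · rintro ⟨i, ⟨h0, h1⟩, j, ⟨h2, h3⟩, rfl⟩
    exact ⟨i, j, h0, h1, h2, h3, rfl⟩
  · rintro ⟨i, j, h0, h1, h2, h3, rfl⟩
    exact ⟨i, ⟨h0, h1⟩, j, ⟨h2, h3⟩, rfl⟩

lemma zip_getD (a b : List Int) (k : Nat) (hk : k < a.length) (hab : a.length ≤ b.length) :
    (a.zip b).getD k (0, 0) = (a.getD k 0, b.getD k 0) := by
  have hz : k < (a.zip b).length := by simp [List.length_zip]; omega
  have hb : k < b.length := by omega
  rw [List.getD_eq_getElem _ _ hz, List.getElem_zip,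
    List.getD_eq_getElem _ _ hk, List.getD_eq_getElem _ _ hb]

/-- A's double loop agrees with the append-order sweep -/
lemma get_beta_eq_sweep (a b : List Int) (hpre : Pre_get_beta a b) :
    get_beta a b = pvSweep a b := by
  rw [get_beta_eq, sweep_eq]
  apply fmax_eq_of_mem_iff
  intro x
  rw [mem_valsA, mem_valsB]
  simp only [List.nil_append, List.length_nil, Nat.zero_le, true_and]
  rcases hpre with hsmall | hab
  · constructor
    · rintro ⟨i, j, h0, h1, h2, h3, -⟩; omega
    · rintro ⟨i, j, h1, h2, -⟩
      have : (a.zip b).length ≤ a.length := by simp [List.length_zip] <;> omega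
      omega
  · have hlen : (a.zip b).length = a.length := by simp [List.length_zip] <;> omega
    constructor
    · rintro ⟨i, j, h0, h1, h2, h3, rfl⟩
      refine ⟨i.toNat, j.toNat, by omega, by omega, ?_⟩
      have hi : i.toNat < a.length := by omega
      have hj : j.toNat < a.length := by omega
      rw [cP, zip_getD a b _ hi hab, zip_getD a b _ hj hab]
      rw [PySem.List.pyGetD_of_nonneg a (0:Int) (by omega : (0:Int) ≤ i),
        PySem.List.pyGetD_of_nonneg a (0:Int) (by omega : (0:Int) ≤ j),
        PySem.List.pyGetD_of_nonneg b (0:Int) (by omega : (0:Int) ≤ i),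
        PySem.List.pyGetD_of_nonneg b (0:Int) (by omega : (0:Int) ≤ j)]
      ring
    · rintro ⟨i, j, h1, h2, rfl⟩
      have hj : j < a.length := by omega
      have hi : i < a.length := by omega
      refine ⟨(i : Int), (j : Int), by omega, by omega, by omega, by omega, ?_⟩
      rw [cP, zip_getD a b _ hi hab, zip_getD a b _ hj hab]
      simp only [PySem.List.pyGetD_natCast]
      ring

-- ---- hull-side lemmas ----

lemma lexLe_trans {p q r : Int × Int} (h1 : lexLe p q) (h2 : lexLe q r) : lexLe p r := by
  unfold lexLe at *; omega

lemma lexLe_of_not_lt {p q : Int × Int} (h : ¬ (q.1 < p.1 ∨ (q.1 = p.1 ∧ q.2 < p.2))) :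
    lexLe p q := by
  unfold lexLe; omega

/-- the key geometric inequality behind the pop: a point popped from a chain is
dominated, in every direction the chain serves, by its neighbour or the new point -/
lemma pop_key (u m c d : Int × Int) (s : Int) (hs : s = 1 ∨ s = -1) (hd : 0 ≤ s * d.2)
    (hum : lexLe u m) (hmc : lexLe m c) (hcr : 0 ≤ s * pvCrossB u m c) :
    dotp m d ≤ dotp u d ∨ dotp m d ≤ dotp c d := by
  obtain ⟨u1, u2⟩ := u; obtain ⟨m1, m2⟩ := m; obtain ⟨c1, c2⟩ := c; obtain ⟨d1, d2⟩ := d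
  simp only [lexLe, pvCrossB, dotp] at *
  by_contra h
  push_neg at h
  obtain ⟨hu, hc⟩ := h
  have hdc : 0 ≤ d2 * ((m1 - u1) * (c2 - u2) - (m2 - u2) * (c1 - u1)) := by
    rcases hs with rfl | rfl
    · exact mul_nonneg (by linarith) (by linarith)
    · nlinarith [mul_nonneg (show (0:Int) ≤ -d2 by linarith)
        (show (0:Int) ≤ -((m1 - u1) * (c2 - u2) - (m2 - u2) * (c1 - u1)) by linarith)]
  rcases lt_or_eq_of_le (show u1 ≤ m1 by omega) with h1 | h1
  · -- t1 = m1 - u1 > 0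
    nlinarith [mul_pos (show (0:Int) < m1 - u1 by omega)
        (show (0:Int) < (m1 * d1 + m2 * d2) - (c1 * d1 + c2 * d2) by linarith),
      mul_nonneg (show (0:Int) ≤ c1 - m1 by omega)
        (show (0:Int) ≤ (m1 * d1 + m2 * d2) - (u1 * d1 + u2 * d2) by linarith)]
  · subst h1
    rcases lt_or_eq_of_le (show u1 ≤ c1 by omega) with h2 | h2
    · -- t2 = c1 - u1 > 0, t1 = 0
      nlinarith [mul_pos (show (0:Int) < c1 - u1 by omega)
        (show (0:Int) < (u1 * d1 + m2 * d2) - (u1 * d1 + u2 * d2) by linarith)]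
    · -- all x-coordinates equal: the y-order decides
      subst h2
      have hy1 : u2 ≤ m2 := by omega
      have hy2 : m2 ≤ c2 := by omega
      rcases hs with rfl | rfl
      · nlinarith [mul_nonneg (show (0:Int) ≤ d2 by linarith) (show (0:Int) ≤ c2 - m2 by omega)]
      · nlinarith [mul_nonneg (show (0:Int) ≤ -d2 by linarith) (show (0:Int) ≤ m2 - u2 by omega)]

lemma pvPop_suffix (s : Int) (st : List (Int × Int)) (c : Int × Int) :
    pvPop s st c <:+ st := by
  induction st using pvPop.induct s c with
  | case1 m u rest hc ih =>
    rw [pvPop]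
    simp only [hc, if_pos]
    exact ih.trans (List.suffix_cons _ _)
  | case2 m u rest hc =>
    rw [pvPop]; simp [hc]
  | case3 st h =>
    have hred : pvPop s st c = st := by
      rcases st with _ | ⟨a, st'⟩
      · simp [pvPop]
      · rcases st' with _ | ⟨b, t⟩
        · simp [pvPop]
        · exact absurd rfl (h a b t)
    rw [hred]

lemma pvPop_cover (s : Int) (d : Int × Int) (hs : s = 1 ∨ s = -1) (hd : 0 ≤ s * d.2)
    (c : Int × Int) (st : List (Int × Int))
    (hchain : List.IsChain (fun x y => lexLe y x) st)
    (hlec : ∀ q ∈ st, lexLe q c) :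
    ∀ q ∈ st, ∃ r ∈ c :: pvPop s st c, dotp q d ≤ dotp r d := by
  induction st using pvPop.induct s c with
  | case1 m u rest hc ih =>
    rw [pvPop]
    simp only [hc, if_pos]
    intro q hq
    have hchain' : List.IsChain (fun x y => lexLe y x) (u :: rest) := (List.isChain_cons.mp hchain).2
    have hlec' : ∀ q ∈ u :: rest, lexLe q c := fun q hq => hlec q (List.mem_cons_of_mem _ hq)
    rcases List.mem_cons.mp hq with rfl | hq'
    · -- q = m, the popped point
      have hum : lexLe u q := (List.isChain_cons.mp hchain).1 u rfl
      have hqc : lexLe q c := hlec q List.mem_cons_self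
      rcases pop_key u q c d s hs hd hum hqc hc with hle | hle
      · obtain ⟨r, hr, hur⟩ := ih hchain' hlec' u List.mem_cons_self
        exact ⟨r, hr, le_trans hle hur⟩
      · exact ⟨c, List.mem_cons_self, hle⟩
    · exact ih hchain' hlec' q hq'
  | case2 m u rest hc =>
    rw [pvPop]
    simp only [hc, if_neg, not_false_iff]
    intro q hq
    exact ⟨q, List.mem_cons_of_mem _ (by simpa using hq), le_rfl⟩
  | case3 st h =>
    have hred : pvPop s st c = st := by
      rcases st with _ | ⟨a, st'⟩
      · simp [pvPop]
      · rcases st' with _ | ⟨b, t⟩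
        · simp [pvPop]
        · exact absurd rfl (h a b t)
    rw [hred]
    intro q hq
    exact ⟨q, List.mem_cons_of_mem _ hq, le_rfl⟩

def chainFold (s : Int) (pts st : List (Int × Int)) : List (Int × Int) :=
  pts.foldl (fun st p => p :: pvPop s st p) st

lemma chainFold_subset (s : Int) (pts : List (Int × Int)) :
    ∀ st x, x ∈ chainFold s pts st → x ∈ st ∨ x ∈ pts := by
  induction pts with
  | nil => intro st x hx; exact Or.inl hx
  | cons p rest ih =>
    intro st x hx
    rcases ih _ x hx with hx' | hx'
    · rcases List.mem_cons.mp hx' with rfl | hx''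
      · exact Or.inr List.mem_cons_self
      · exact Or.inl ((pvPop_suffix s st p).subset hx'')
    · exact Or.inr (List.mem_cons_of_mem _ hx')

lemma chainFold_cover (s : Int) (d : Int × Int) (hs : s = 1 ∨ s = -1) (hd : 0 ≤ s * d.2) :
    ∀ (pts st : List (Int × Int)),
      List.Pairwise lexLe pts →
      List.IsChain (fun x y => lexLe y x) st →
      (∀ q ∈ st, ∀ p ∈ pts, lexLe q p) →
      ∀ q, (q ∈ st ∨ q ∈ pts) →
        ∃ r ∈ chainFold s pts st, dotp q d ≤ dotp r d := by
  intro pts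
  induction pts with
  | nil =>
    intro st _ _ _ q hq
    rcases hq with hq | hq
    · exact ⟨q, hq, le_rfl⟩
    · simp at hq
  | cons p rest ih =>
    intro st hsort hchain hbound q hq
    have hpop_sub := (pvPop_suffix s st p).subset
    have hlep : ∀ x ∈ st, lexLe x p := fun x hx => hbound x hx p List.mem_cons_self
    -- the new stack
    have hchain' : List.IsChain (fun x y => lexLe y x) (p :: pvPop s st p) := by
      rw [List.isChain_cons]
      constructor
      · intro b hb
        exact hlep b (hpop_sub (List.mem_of_mem_head? hb))
      · exact hchain.suffix (pvPop_suffix s st p)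
    have hbound' : ∀ x ∈ p :: pvPop s st p, ∀ r ∈ rest, lexLe x r := by
      intro x hx r hr
      rcases List.mem_cons.mp hx with rfl | hx'
      · exact (List.pairwise_cons.mp hsort).1 r hr
      · exact hbound x (hpop_sub hx') r (List.mem_cons_of_mem _ hr)
    have hsort' : List.Pairwise lexLe rest := (List.pairwise_cons.mp hsort).2
    have key : ∀ q', q' ∈ p :: pvPop s st p ∨ q' ∈ rest →
        ∃ r ∈ chainFold s (p :: rest) st, dotp q' d ≤ dotp r d := by
      intro q' hq'
      have : chainFold s (p :: rest) st = chainFold s rest (p :: pvPop s st p) := rfl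
      rw [this]
      exact ih (p :: pvPop s st p) hsort' hchain' hbound' q' hq'
    rcases hq with hq | hq
    · obtain ⟨r0, hr0, hqr0⟩ := pvPop_cover s d hs hd p st hchain hlep q hq
      obtain ⟨r, hr, hr0r⟩ := key r0 (Or.inl hr0)
      exact ⟨r, hr, le_trans hqr0 hr0r⟩
    · rcases List.mem_cons.mp hq with rfl | hq'
      · exact key q (Or.inl List.mem_cons_self)
      · exact key q (Or.inr hq')

lemma pvChain_subset (s : Int) (pts : List (Int × Int)) : ∀ x ∈ pvChain s pts, x ∈ pts := by
  intro x hx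
  rw [pvChain, List.mem_reverse] at hx
  rcases chainFold_subset s pts [] x hx with h | h
  · simp at h
  · exact h

lemma pvChain_cover (s : Int) (d : Int × Int) (hs : s = 1 ∨ s = -1) (hd : 0 ≤ s * d.2)
    (pts : List (Int × Int)) (hsort : List.Pairwise lexLe pts) :
    ∀ q ∈ pts, ∃ r ∈ pvChain s pts, dotp q d ≤ dotp r d := by
  intro q hq
  obtain ⟨r, hr, hle⟩ := chainFold_cover s d hs hd pts [] hsort List.isChain_nil (by intro q' hq'; simp at hq') q (Or.inr hq)
  exact ⟨r, by rw [pvChain, List.mem_reverse]; exact hr, hle⟩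

/-- querying the two chains of a sorted prefix gives the same running maximum as
scanning the whole prefix -/
lemma hull_query (c : Int) (pts : List (Int × Int)) (x y : Int)
    (hsort : List.Pairwise lexLe pts) :
    fmax c ((pvChain 1 pts ++ pvChain (-1) pts).map (fun pq => pq.1 * y - pq.2 * x))
      = fmax c (pts.map (fun pq => pq.1 * y - pq.2 * x)) := by
  have hfd : (fun pq : Int × Int => pq.1 * y - pq.2 * x) = fun pq => dotp pq (y, -x) := by
    funext pq; unfold dotp; ring
  rw [hfd]
  apply le_antisymm
  · rw [fmax_le_iff]
    refine ⟨c_le_fmax _ _, ?_⟩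
    intro v hv
    obtain ⟨pq, hpq, rfl⟩ := List.mem_map.mp hv
    have : pq ∈ pts := by
      rcases List.mem_append.mp hpq with h | h
      · exact pvChain_subset 1 pts pq h
      · exact pvChain_subset (-1) pts pq h
    exact le_fmax_of_mem c (List.mem_map_of_mem this)
  · rw [fmax_le_iff]
    refine ⟨c_le_fmax _ _, ?_⟩
    intro v hv
    obtain ⟨pq, hpq, rfl⟩ := List.mem_map.mp hv
    by_cases hx : 0 ≤ -x
    · obtain ⟨r, hr, hle⟩ := pvChain_cover 1 (y, -x) (Or.inl rfl) (by simpa using hx) pts hsort pq hpq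
      exact le_trans hle (le_fmax_of_mem c (List.mem_map_of_mem (List.mem_append_left _ hr)))
    · obtain ⟨r, hr, hle⟩ := pvChain_cover (-1) (y, -x) (Or.inr rfl) (by simp; omega) pts hsort pq hpq
      exact le_trans hle (le_fmax_of_mem c (List.mem_map_of_mem (List.mem_append_right _ hr)))

lemma mem_pvInsert (l : List (Int × Int)) (q x : Int × Int) :
    x ∈ pvInsert l q ↔ x = q ∨ x ∈ l := by
  induction l with
  | nil => simp [pvInsert]
  | cons p rest ih =>
    rw [pvInsert]
    split
    · simp [List.mem_cons]
    · simp [List.mem_cons, ih]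
      tauto

lemma pvInsert_perm (l : List (Int × Int)) (q : Int × Int) :
    (pvInsert l q).Perm (q :: l) := by
  induction l with
  | nil => simp [pvInsert]
  | cons p rest ih =>
    rw [pvInsert]
    split
    · exact List.Perm.refl _
    · exact (List.Perm.cons p ih).trans (List.Perm.swap q p rest)

lemma pvInsert_sorted (l : List (Int × Int)) (q : Int × Int)
    (hl : List.Pairwise lexLe l) : List.Pairwise lexLe (pvInsert l q) := by
  induction l with
  | nil => simp [pvInsert, List.pairwise_cons]
  | cons p rest ih =>
    obtain ⟨hp, hrest⟩ := List.pairwise_cons.mp hl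
    rw [pvInsert]
    split
    · next hlt =>
      have hqp : lexLe q p := by unfold lexLe; rcases hlt with h | ⟨h1, h2⟩ <;> omega
      rw [List.pairwise_cons]
      refine ⟨?_, hl⟩
      intro r hr
      rcases List.mem_cons.mp hr with rfl | hr'
      · exact hqp
      · exact lexLe_trans hqp (hp r hr')
    · next hnlt =>
      have hpq : lexLe p q := lexLe_of_not_lt hnlt
      rw [List.pairwise_cons]
      refine ⟨?_, ih hrest⟩
      intro r hr
      rcases (mem_pvInsert rest q r).mp hr with rfl | hr'
      · exact hpq
      · exact hp r hr'

/-- the hull sweep agrees with the append-order sweep -/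
lemma sweep_eq_alt_aux (rest : List (Int × Int)) :
    ∀ (c : Int) (l1 l2 : List (Int × Int)), l2.Perm l1 → List.Pairwise lexLe l2 →
      (rest.foldl (fun (st : Int × List (Int × Int)) (xy : Int × Int) =>
          let best := st.2.foldl (fun bst pq =>
            let cur := pq.1 * xy.2 - pq.2 * xy.1
            if cur > bst then cur else bst) st.1
          (best, st.2 ++ [xy])) (c, l1)).1
      = (rest.foldl (fun (st : Int × List (Int × Int)) (xy : Int × Int) =>
          let best := [pvChain 1 st.2, pvChain (-1) st.2].foldl
            (fun bst hull => hull.foldl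
              (fun bst pq =>
                let cur := pq.1 * xy.2 - pq.2 * xy.1
                if cur > bst then cur else bst) bst) st.1
          (best, pvInsert st.2 xy)) (c, l2)).1 := by
  induction rest with
  | nil => intro c l1 l2 _ _; rfl
  | cons xy t ih =>
    intro c l1 l2 hperm hsort
    simp only [List.foldl_cons]
    have hbest :
        ([pvChain 1 l2, pvChain (-1) l2].foldl
          (fun bst hull => hull.foldl
            (fun bst pq =>
              let cur := pq.1 * xy.2 - pq.2 * xy.1
              if cur > bst then cur else bst) bst) c)
        = (l1.foldl (fun bst pq =>
            let cur := pq.1 * xy.2 - pq.2 * xy.1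
            if cur > bst then cur else bst) c) := by
      simp only [List.foldl_cons, List.foldl_nil]
      rw [foldB_inner, foldB_inner, foldB_inner, ← fmax_append, ← List.map_append,
        hull_query c l2 xy.1 xy.2 hsort]
      exact fmax_eq_of_mem_iff c _ _ (fun v => by
        constructor
        · intro hv
          obtain ⟨pq, hpq, rfl⟩ := List.mem_map.mp hv
          exact List.mem_map_of_mem (hperm.mem_iff.mp hpq)
        · intro hv
          obtain ⟨pq, hpq, rfl⟩ := List.mem_map.mp hv
          exact List.mem_map_of_mem (hperm.mem_iff.mpr hpq))
    rw [← hbest]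
    exact ih _ (l1 ++ [xy]) (pvInsert l2 xy)
      ((pvInsert_perm l2 xy).trans ((hperm.cons xy).trans (List.perm_append_singleton xy l1).symm))
      (pvInsert_sorted l2 xy hsort)

lemma sweep_eq_alt (a b : List Int) : pvSweep a b = get_beta_alt a b := by
  unfold pvSweep get_beta_alt
  exact sweep_eq_alt_aux (a.zip b) 0 [] [] (List.Perm.refl _) (by simp)

-- ===== VERDICT (by name: the statement is the Claim_ definition above) =====
theorem get_beta_spec : Claim_equal_get_beta := by
  intro a b _ hpre
  show get_beta a b = get_beta_alt a b
  rw [get_beta_eq_sweep a b hpre, sweep_eq_alt]
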